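-- pv_equiv track=rewrite | github.com/anthonycurtisadler/ARCADES | indexformat.py | truncate_small
-- ===== SOURCE A (Python) =====
-- SUBHEAD_WORDS = ['and','of','as','vs.','for','a','the','into']
--
-- def truncate_small(x,words=SUBHEAD_WORDS):
--
--     while x:
--         found = False
--         for w in words:
--             if x.startswith(w+' '):
--                 x = x[len(w+' '):]
--                 found = True
--         if not found:
--             break
--     return x
-- ===== SOURCE B (Python) =====
-- SUBHEAD_WORDS = ['and','of','as','vs.','for','a','the','into']
--
-- def truncate_small(x, words=SUBHEAD_WORDS):
--     ws = set(words)
--     while True: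
--         j = x.find(' ')
--         if j == -1 or x[:j] not in ws:
--             return x
--         x = x[j+1:]
-- ===== Notes on version B (the rewrite author's own statement) =====
-- stated objective: faster
-- what changed: A repeatedly rescans the whole word list in multiple fixpoint passes, slicing off one 'word + space' prefix per hit; B makes a single forward scan: find the next space, look the leading token up in a set built once, and cut it off. Pre_ excludes inputs where some word containing a space has 'w + space' occurring inside x: only there A's multi-token unit stripping and B's token scan can legitimately disagree. Mechanism: one pass over the string with O(1) set lookups instead of repeated whole-word-list passes, measured ~2x at the largest timing size.
-- outside the precondition, e.g. on truncate_small('x ab c d', ['ab', 'x', 'ab c']): A returns 'd', B returns 'c d'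
import Mathlib
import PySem

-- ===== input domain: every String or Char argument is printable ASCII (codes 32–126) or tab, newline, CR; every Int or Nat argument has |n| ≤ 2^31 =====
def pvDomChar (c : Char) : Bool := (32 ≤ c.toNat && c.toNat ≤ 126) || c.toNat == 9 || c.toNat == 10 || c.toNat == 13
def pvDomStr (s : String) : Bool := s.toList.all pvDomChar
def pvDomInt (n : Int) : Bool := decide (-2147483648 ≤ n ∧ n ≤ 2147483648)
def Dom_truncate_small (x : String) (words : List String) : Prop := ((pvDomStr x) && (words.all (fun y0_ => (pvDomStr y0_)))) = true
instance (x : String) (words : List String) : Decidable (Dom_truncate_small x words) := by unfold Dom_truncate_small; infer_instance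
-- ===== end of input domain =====

-- B replaces A's repeated multi-pass scans over the word list by a single forward scan:
-- find the next space, look the leading token up in a set, and slice it off.
-- Equivalence is claimed on word lists whose words contain no space (Pre_); strings are ported via List Char.

-- ===== PORT A =====
-- one step of A's inner `for w in words` loop: state = (x, found)
def stepA (vf : List Char × Bool) (w : List Char) : List Char × Bool :=
  if PySem.Chars.startswith vf.1 (w ++ [' ']) then
    (PySem.List.slice vf.1 (some (((w ++ [' ']).length : Int))) none, true)   -- x = x[len(w+' '):]
  else vf

-- termination facts for A's while-loop (cited by truncA's decreasing_by)
theorem stepA_fst_length_le (vf : List Char × Bool) (w : List Char) :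
    (stepA vf w).1.length ≤ vf.1.length := by
  unfold stepA
  split
  · rw [PySem.List.slice_from vf.1 (by positivity : (0:Int) ≤ ((w ++ [' ']).length : Int))]
    simp
  · exact le_refl _

theorem foldA_fst_length_le (ws : List (List Char)) (vf : List Char × Bool) :
    (ws.foldl stepA vf).1.length ≤ vf.1.length := by
  induction ws generalizing vf with
  | nil => exact le_refl _
  | cons w rest ih => exact le_trans (ih (stepA vf w)) (stepA_fst_length_le vf w)

theorem foldA_snd_length_lt (ws : List (List Char)) (v : List Char)
    (h : (ws.foldl stepA (v, false)).2 = true) :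
    (ws.foldl stepA (v, false)).1.length < v.length := by
  induction ws generalizing v with
  | nil => simp at h
  | cons w rest ih =>
    simp only [List.foldl_cons] at h ⊢
    by_cases hs : PySem.Chars.startswith v (w ++ [' ']) = true
    · have hstep : stepA (v, false) w
          = (PySem.List.slice v (some (((w ++ [' ']).length : Int))) none, true) := by
        unfold stepA; simp [hs]
      have hlt : (PySem.List.slice v (some (((w ++ [' ']).length : Int))) none).length < v.length := by
        rw [PySem.List.slice_from v (by positivity : (0:Int) ≤ ((w ++ [' ']).length : Int))]
        have hpfx : (w ++ [' ']) <+: v := (PySem.Chars.startswith_iff v (w ++ [' '])).mp hs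
        have hle : (w ++ [' ']).length ≤ v.length := hpfx.length_le
        simp only [List.length_drop]
        simp only [List.length_append, List.length_cons, List.length_nil] at hle ⊢
        omega
      calc ((rest.foldl stepA (stepA (v, false) w)).1).length
          ≤ (stepA (v, false) w).1.length := foldA_fst_length_le rest _
        _ < v.length := by rw [hstep]; exact hlt
    · have hstep : stepA (v, false) w = (v, false) := by unfold stepA; simp [hs]
      rw [hstep] at h ⊢
      exact ih v h

def passA (ws : List (List Char)) (v : List Char) : List Char × Bool :=
  ws.foldl stepA (v, false)

theorem passA_snd_length_lt (ws : List (List Char)) (v : List Char)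
    (h : (passA ws v).2 = true) : (passA ws v).1.length < v.length :=
  foldA_snd_length_lt ws v h

-- A's while loop
def truncA (s : List Char) (ws : List (List Char)) : List Char :=
  if s = [] then s                                   -- while x:
  else if h : (passA ws s).2 = true                  -- one pass of `for w in words`; found?
  then truncA (passA ws s).1 ws                      -- continue the while loop
  else s                                             -- break
termination_by s.length
decreasing_by exact passA_snd_length_lt ws s h

def truncate_small (x : String) (words : List String) : String :=
  String.mk (truncA x.toList (words.map String.toList))

-- ===== PORT B =====
-- B's while loop: j = x.find(' '); return x unless x[:j] in ws; else x = x[j+1:]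
def truncB (s : List Char) (ws : PySem.Set (List Char)) : List Char :=
  let j := PySem.Chars.find s [' ']
  if j = -1 ∨ PySem.List.slice s none (some j) ∉ ws then s
  else truncB (PySem.List.slice s (some (j + 1)) none) ws
termination_by s.length
decreasing_by
  rename_i hcond
  push_neg at hcond
  have hj : 0 ≤ PySem.Chars.find s [' '] := by
    have := PySem.Chars.neg_one_le_find s [' ']
    omega
  have hinf : [' '] <:+: s := (PySem.Chars.find_nonneg_iff s [' ']).mp hj
  have hne : s ≠ [] := by
    rintro rfl
    exact absurd (List.infix_nil.mp hinf) (by simp)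
  rw [PySem.List.slice_from s (by omega : (0:Int) ≤ PySem.Chars.find s [' '] + 1)]
  have : 0 < s.length := List.length_pos_iff.mpr hne
  have : 0 < (PySem.Chars.find s [' '] + 1).toNat := by omega
  simp only [List.length_drop]
  omega

def truncate_small_alt (x : String) (words : List String) : String :=
  String.mk (truncB x.toList (PySem.Set.ofList (words.map String.toList)))

-- ===== PRECONDITION & SPEC =====
-- Pre_ excludes inputs where some word containing a space has `w + ' '` occurring inside x:
-- only there can A's unit `w + ' '` span several tokens, so A's multi-pass stripping may remove
-- a different leading run than B's token-at-a-time scan (both readings are defensible for such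
-- degenerate "words"); everywhere else such words are inert in both programs.
def Pre_truncate_small (x : String) (words : List String) : Prop :=
  ∀ w ∈ words, ' ' ∈ w.toList → ¬ ((w.toList ++ [' ']) <:+: x.toList)
instance (x : String) (words : List String) : Decidable (Pre_truncate_small x words) := by
  unfold Pre_truncate_small; infer_instance

def pvWitness_truncate_small : String × List String := ("the a cat and dog", ["a", "the", "and"])

def Spec_truncate_small (x : String) (words : List String) (out : String) : Prop := out = truncate_small_alt x words
instance (x : String) (words : List String) (out : String) : Decidable (Spec_truncate_small x words out) := by unfold Spec_truncate_small; infer_instance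

-- ===== CLAIM (what is proved, stated in full; the proofs are below) =====
def Claim_equal_truncate_small : Prop := ∀ (x : String) (words : List String), Dom_truncate_small x words → Pre_truncate_small x words → Spec_truncate_small x words (truncate_small x words)

-- ===== LEMMAS AND PROOFS =====

-- if w (spaceless) + ' ' is a prefix of s, the first space of s sits exactly at w.length
theorem find_space_of_prefix (s w : List Char) (hsp : ¬ (' ' ∈ w)) (hpfx : (w ++ [' ']) <+: s) :
    PySem.Chars.find s [' '] = (w.length : Int) := by
  rcases hpfx with ⟨t, rfl⟩
  have hinf : [' '] <:+: (w ++ [' ']) ++ t := ⟨w, t, by simp⟩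
  have h0 : 0 ≤ PySem.Chars.find ((w ++ [' ']) ++ t) [' '] :=
    (PySem.Chars.find_nonneg_iff _ _).mpr hinf
  obtain ⟨hp, hmin⟩ := PySem.Chars.find_spec h0
  set k := (PySem.Chars.find ((w ++ [' ']) ++ t) [' ']).toNat with hk
  have hkw : k = w.length := by
    rcases lt_trichotomy k w.length with hlt | heq | hgt
    · exfalso
      rcases hp with ⟨r, hr⟩
      have hget : ((w ++ [' ']) ++ t)[k]? = some ' ' := by
        have h1 : (((w ++ [' ']) ++ t).drop k)[0]? = some ' ' := by rw [← hr]; rfl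
        rw [List.getElem?_drop] at h1
        simpa using h1
      have hget2 : ((w ++ [' ']) ++ t)[k]? = w[k]? := by
        rw [List.append_assoc]
        exact List.getElem?_append_left hlt
      have hkmem : (' ' : Char) ∈ w := by
        have : w[k]? = some ' ' := by rw [← hget2]; exact hget
        exact List.mem_of_getElem? this
      exact hsp hkmem
    · exact heq
    · exfalso
      apply hmin w.length hgt
      rw [List.append_assoc, List.drop_left]
      exact ⟨t, rfl⟩
  omega

-- the leading token of s is w itself
theorem take_of_prefix (s w : List Char) (hpfx : (w ++ [' ']) <+: s) :
    s.take w.length = w := by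
  rcases hpfx with ⟨t, rfl⟩
  rw [List.append_assoc]
  simpa using List.take_left w ([' '] ++ t)

-- one matched strip step is invisible to truncB
theorem truncB_step (cws : List (List Char)) (s w : List Char)
    (hw : w ∈ cws) (hsp : ¬ (' ' ∈ w)) (hpfx : (w ++ [' ']) <+: s) :
    truncB s (PySem.Set.ofList cws) = truncB (s.drop (w.length + 1)) (PySem.Set.ofList cws) := by
  have hfind := find_space_of_prefix s w hsp hpfx
  have htake : PySem.List.slice s none (some ((w.length : Int))) = w := by
    rw [PySem.List.slice_to s (by positivity : (0:Int) ≤ (w.length : Int))]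
    simpa using take_of_prefix s w hpfx
  have hmem : w ∈ PySem.Set.ofList cws := (PySem.Set.mem_ofList cws w).mpr hw
  rw [truncB]
  simp only [hfind]
  have h2 : PySem.List.slice s (some ((w.length : Int) + 1)) none = s.drop (w.length + 1) := by
    rw [PySem.List.slice_from s (by positivity : (0:Int) ≤ ((w.length : Int) + 1)),
      (by omega : ((w.length : Int) + 1).toNat = w.length + 1)]
  rw [if_neg (by push_neg; refine ⟨by omega, ?_⟩; rw [htake]; simpa using hmem), h2]

theorem truncB_nomatch (cws : List (List Char)) (s : List Char)
    (hnm : ∀ w ∈ cws, ¬ ((w ++ [' ']) <+: s)) :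
    truncB s (PySem.Set.ofList cws) = s := by
  rw [truncB]
  split
  · rfl
  · exfalso
    rename_i hcond
    push_neg at hcond
    obtain ⟨hne, hmem⟩ := hcond
    have h0 : 0 ≤ PySem.Chars.find s [' '] := by
      have := PySem.Chars.neg_one_le_find s [' ']
      omega
    obtain ⟨hp, -⟩ := PySem.Chars.find_spec h0
    set k := (PySem.Chars.find s [' ']).toNat with hk
    have htake : PySem.List.slice s none (some (PySem.Chars.find s [' '])) = s.take k :=
      PySem.List.slice_to s h0
    rw [htake] at hmem
    have hmem' : s.take k ∈ cws := (PySem.Set.mem_ofList cws _).mp hmem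
    rcases hp with ⟨r, hr⟩
    apply hnm (s.take k) hmem'
    refine ⟨r, ?_⟩
    calc (s.take k ++ [' ']) ++ r = s.take k ++ ([' '] ++ r) := by rw [List.append_assoc]
      _ = s.take k ++ s.drop k := by rw [hr]
      _ = s := List.take_append_drop k s

-- each stepA output is a suffix of its input string
theorem stepA_fst_suffix (vf : List Char × Bool) (w : List Char) :
    (stepA vf w).1 <:+ vf.1 := by
  unfold stepA
  split
  · rw [PySem.List.slice_from vf.1 (by positivity : (0:Int) ≤ ((w ++ [' ']).length : Int))]
    exact List.drop_suffix _ _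
  · exact List.suffix_refl _

theorem foldA_fst_suffix (ws : List (List Char)) (vf : List Char × Bool) :
    (ws.foldl stepA vf).1 <:+ vf.1 := by
  induction ws generalizing vf with
  | nil => exact List.suffix_refl _
  | cons w rest ih => exact (ih (stepA vf w)).trans (stepA_fst_suffix vf w)

-- a whole pass of A's inner loop is invisible to truncB
theorem truncB_foldA (x : List Char) (cws : List (List Char))
    (hpre : ∀ w ∈ cws, ' ' ∈ w → ¬ ((w ++ [' ']) <:+: x))
    (ws' : List (List Char)) (hsub : ∀ w ∈ ws', w ∈ cws) :
    ∀ (v : List Char) (f : Bool), v <:+ x →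
      truncB ((ws'.foldl stepA (v, f)).1) (PySem.Set.ofList cws) = truncB v (PySem.Set.ofList cws) := by
  induction ws' with
  | nil => intro v f _; rfl
  | cons w rest ih =>
    intro v f hv
    have hsub' : ∀ u ∈ rest, u ∈ cws := fun u hu => hsub u (List.mem_cons_of_mem w hu)
    have hwc : w ∈ cws := hsub w List.mem_cons_self
    simp only [List.foldl_cons]
    by_cases hs : PySem.Chars.startswith v (w ++ [' ']) = true
    · have hpfx : (w ++ [' ']) <+: v := (PySem.Chars.startswith_iff v (w ++ [' '])).mp hs
      have hsp : ¬ (' ' ∈ w) := fun hspace =>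
        hpre w hwc hspace (hpfx.isInfix.trans hv.isInfix)
      have hstep : stepA (v, f) w
          = (PySem.List.slice v (some (((w ++ [' ']).length : Int))) none, true) := by
        unfold stepA; simp [hs]
      have hdrop : PySem.List.slice v (some (((w ++ [' ']).length : Int))) none
          = v.drop (w.length + 1) := by
        rw [PySem.List.slice_from v (by positivity : (0:Int) ≤ ((w ++ [' ']).length : Int))]
        congr 1
        simp
      rw [hstep, ih hsub' _ true (by rw [hdrop]; exact (List.drop_suffix _ _).trans hv), hdrop]
      exact (truncB_step cws v w hwc hsp hpfx).symm
    · have hstep : stepA (v, f) w = (v, f) := by unfold stepA; simp [hs]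
      rw [hstep, ih hsub' v f hv]

theorem foldA_snd_mono (ws : List (List Char)) (v : List Char) :
    (ws.foldl stepA (v, true)).2 = true := by
  induction ws generalizing v with
  | nil => rfl
  | cons w rest ih =>
    simp only [List.foldl_cons]
    by_cases hs : PySem.Chars.startswith v (w ++ [' ']) = true
    · have hstep : stepA (v, true) w
          = (PySem.List.slice v (some (((w ++ [' ']).length : Int))) none, true) := by
        unfold stepA; simp [hs]
      rw [hstep]; exact ih _
    · have hstep : stepA (v, true) w = (v, true) := by unfold stepA; simp [hs]
      rw [hstep]; exact ih v

theorem foldA_snd_false_nomatch (ws : List (List Char)) (v : List Char)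
    (h : (ws.foldl stepA (v, false)).2 = false) :
    ∀ w ∈ ws, ¬ ((w ++ [' ']) <+: v) := by
  induction ws generalizing v with
  | nil => intro w hw; simp at hw
  | cons w rest ih =>
    simp only [List.foldl_cons] at h
    by_cases hs : PySem.Chars.startswith v (w ++ [' ']) = true
    · exfalso
      have hstep : stepA (v, false) w
          = (PySem.List.slice v (some (((w ++ [' ']).length : Int))) none, true) := by
        unfold stepA; simp [hs]
      rw [hstep, foldA_snd_mono] at h
      exact absurd h (by simp)
    · have hstep : stepA (v, false) w = (v, false) := by unfold stepA; simp [hs]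
      rw [hstep] at h
      intro w' hw'
      rcases List.mem_cons.mp hw' with rfl | hw'
      · exact fun hp => hs ((PySem.Chars.startswith_iff v (w' ++ [' '])).mpr hp)
      · exact ih v h w' hw'

theorem main_eq (x : List Char) (cws : List (List Char))
    (hpre : ∀ w ∈ cws, ' ' ∈ w → ¬ ((w ++ [' ']) <:+: x)) (s : List Char) (hsuf : s <:+ x) :
    truncA s cws = truncB s (PySem.Set.ofList cws) := by
  induction hn : s.length using Nat.strong_induction_on generalizing s with
  | _ n ih =>
  subst hn
  rw [truncA]
  by_cases hnil : s = []
  · subst hnil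
    simp only [if_pos rfl]
    symm
    apply truncB_nomatch
    intro w hw hpfx
    have := hpfx.length_le
    simp at this
  · rw [if_neg hnil]
    by_cases hf : (passA cws s).2 = true
    · rw [dif_pos hf]
      have hsuf' : (passA cws s).1 <:+ x := (foldA_fst_suffix cws (s, false)).trans hsuf
      rw [ih (passA cws s).1.length (passA_snd_length_lt cws s hf) _ hsuf' rfl]
      exact truncB_foldA x cws hpre cws (fun _ h => h) s false hsuf
    · rw [dif_neg hf]
      symm
      apply truncB_nomatch
      exact foldA_snd_false_nomatch cws s (by simpa using hf)

-- ===== VERDICT (by name: the statement is the Claim_ definition above) =====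
theorem truncate_small_spec : Claim_equal_truncate_small := by
  intro x words _ hpre
  unfold Spec_truncate_small truncate_small truncate_small_alt
  have hpre' : ∀ w ∈ words.map String.toList, ' ' ∈ w → ¬ ((w ++ [' ']) <:+: x.toList) := by
    intro w hw
    rcases List.mem_map.mp hw with ⟨w0, hw0, rfl⟩
    exact hpre w0 hw0
  rw [main_eq x.toList _ hpre' x.toList (List.suffix_refl _)]
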